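-- pv_equiv track=rewrite | github.com/Michaeltose/Chinese-Text-Segmentor | evaluate.py | to_region
-- ===== SOURCE A (Python) =====
-- def to_region(segments: str) -> tuple:
--     '''
--     将分词结果转换为区间
--     '''
--     region = []
--     start = 0
--     for seg in segments:
--         end = start + len(seg)
--         region.append((start, end))
--         start = end
--     return region
-- ===== SOURCE B (Python) =====
-- def to_region(segments: str) -> tuple:
--     '''
--     将分词结果转换为区间
--     '''
--     end = sum(len(seg) for seg in segments)
--     region = []
--     for seg in reversed(segments):
--         region.append((end - len(seg), end))
--         end -= len(seg)
--     region.reverse()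
--     return region
-- ===== Notes on version B (the rewrite author's own statement) =====
-- stated objective: alternative
-- what changed: B computes the total length first, then traverses the segments in reverse threading the end boundary downward and building the interval list back-to-front, reversing it at the end, instead of A's forward loop threading a running start.
import Mathlib
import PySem

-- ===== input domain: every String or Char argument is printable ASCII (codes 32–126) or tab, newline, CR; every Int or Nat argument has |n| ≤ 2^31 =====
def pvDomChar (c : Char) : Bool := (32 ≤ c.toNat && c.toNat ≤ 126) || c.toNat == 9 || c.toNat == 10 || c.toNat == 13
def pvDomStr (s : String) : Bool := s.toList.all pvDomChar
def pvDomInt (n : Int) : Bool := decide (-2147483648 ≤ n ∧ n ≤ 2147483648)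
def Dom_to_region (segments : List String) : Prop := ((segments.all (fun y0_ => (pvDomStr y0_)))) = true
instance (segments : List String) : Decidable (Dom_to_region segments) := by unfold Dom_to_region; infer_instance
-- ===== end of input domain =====

-- B walks the segments in reverse, threading the end boundary and building back-to-front; alternative decomposition, same cost.

-- ===== PORT A =====
-- region = []; start = 0; for seg in segments: end = start+len(seg); region.append((start,end)); start = end
def to_region (segments : List String) : List (Int × Int) :=
  (segments.foldl
    (fun (st : List (Int × Int) × Int) seg =>
      let e := st.2 + PySem.Str.len seg
      (st.1 ++ [(st.2, e)], e))
    ([], 0)).1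

-- ===== PORT B =====
-- end = sum(len(seg)...); for seg in reversed(segments): region.append((end-len(seg), end)); end -= len(seg); region.reverse()
def to_region_alt (segments : List String) : List (Int × Int) :=
  let e0 := segments.foldl (fun acc seg => acc + PySem.Str.len seg) 0
  let st := segments.reverse.foldl
    (fun (st : List (Int × Int) × Int) seg =>
      (st.1 ++ [(st.2 - PySem.Str.len seg, st.2)], st.2 - PySem.Str.len seg))
    ([], e0)
  st.1.reverse

-- ===== PRECONDITION & SPEC =====
def Spec_to_region (segments : List String) (out : List (Int × Int)) : Prop := out = to_region_alt segments
instance (segments : List String) (out : List (Int × Int)) : Decidable (Spec_to_region segments out) := by unfold Spec_to_region; infer_instance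

-- ===== CLAIM (what is proved, stated in full; the proofs are below) =====
def Claim_equal_to_region : Prop := ∀ (segments : List String), Dom_to_region segments → Spec_to_region segments (to_region segments)

-- ===== LEMMAS AND PROOFS =====
/-- Reference recursion: the intervals starting at boundary `s`. -/
def pvGo (s : Int) : List String → List (Int × Int)
  | [] => []
  | x :: xs => (s, s + PySem.Str.len x) :: pvGo (s + PySem.Str.len x) xs

/-- Total length. -/
def pvS : List String → Int
  | [] => 0
  | x :: xs => PySem.Str.len x + pvS xs

theorem foldlA_eq (l : List String) : ∀ (r : List (Int × Int)) (s : Int),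
    (l.foldl (fun (st : List (Int × Int) × Int) seg =>
      let e := st.2 + PySem.Str.len seg
      (st.1 ++ [(st.2, e)], e)) (r, s)).1 = r ++ pvGo s l := by
  induction l with
  | nil => intro r s; simp [pvGo]
  | cons x xs ih =>
      intro r s
      simp only [List.foldl_cons, pvGo]
      rw [ih]
      simp

theorem foldl_sum (l : List String) : ∀ (c : Int),
    l.foldl (fun acc seg => acc + PySem.Str.len seg) c = c + pvS l := by
  induction l with
  | nil => intro c; simp [pvS]
  | cons x xs ih => intro c; simp only [List.foldl_cons, pvS]; rw [ih]; ring

theorem foldlB_eq (l : List String) : ∀ (r : List (Int × Int)) (e : Int),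
    l.reverse.foldl
      (fun (st : List (Int × Int) × Int) seg =>
        (st.1 ++ [(st.2 - PySem.Str.len seg, st.2)], st.2 - PySem.Str.len seg))
      (r, e)
    = (r ++ (pvGo (e - pvS l) l).reverse, e - pvS l) := by
  induction l with
  | nil => intro r e; simp [pvGo, pvS]
  | cons x xs ih =>
      intro r e
      simp only [List.reverse_cons, List.foldl_append, List.foldl_cons, List.foldl_nil, pvS]
      rw [ih]
      have h1 : e - pvS xs - PySem.Str.len x = e - (PySem.Str.len x + pvS xs) := by ring
      have h2 : e - (PySem.Str.len x + pvS xs) + PySem.Str.len x = e - pvS xs := by ring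
      simp only [pvGo, List.reverse_cons, h1, h2, List.append_assoc]

-- ===== VERDICT (by name: the statement is the Claim_ definition above) =====
theorem to_region_spec : Claim_equal_to_region := by
  intro segments _
  show to_region segments = to_region_alt segments
  unfold to_region to_region_alt
  rw [foldlA_eq segments [] 0]
  simp only [foldl_sum, foldlB_eq]
  norm_num
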